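-- pv_equiv track=rewrite | github.com/ericl12345/five-chess | ckeckVerticalLine.py | check_vertical_line
-- ===== SOURCE A (Python) =====
-- def check_vertical_line(player_selection, board_line):
--     count = len(board_line)
--     for i in range(count - 4):
--         win = 0
--         for j in range(5):
--             if board_line[i + j] == player_selection:
--                 win = win + 1
--         if (win == 5):
--             return True
--
--     return False
-- ===== SOURCE B (Python) =====
-- def check_vertical_line(player_selection, board_line):
--     streak = 0
--     for cell in board_line:
--         streak = streak + 1 if cell == player_selection else 0
--         if streak == 5:
--             return True
--     return False
-- ===== Notes on version B (the rewrite author's own statement) =====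
-- stated objective: faster
-- what changed: Replaced the nested window scan (each start index re-counts a 5-cell window) by a single pass keeping a consecutive-match streak counter that resets on mismatch and triggers at 5.
import Mathlib
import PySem

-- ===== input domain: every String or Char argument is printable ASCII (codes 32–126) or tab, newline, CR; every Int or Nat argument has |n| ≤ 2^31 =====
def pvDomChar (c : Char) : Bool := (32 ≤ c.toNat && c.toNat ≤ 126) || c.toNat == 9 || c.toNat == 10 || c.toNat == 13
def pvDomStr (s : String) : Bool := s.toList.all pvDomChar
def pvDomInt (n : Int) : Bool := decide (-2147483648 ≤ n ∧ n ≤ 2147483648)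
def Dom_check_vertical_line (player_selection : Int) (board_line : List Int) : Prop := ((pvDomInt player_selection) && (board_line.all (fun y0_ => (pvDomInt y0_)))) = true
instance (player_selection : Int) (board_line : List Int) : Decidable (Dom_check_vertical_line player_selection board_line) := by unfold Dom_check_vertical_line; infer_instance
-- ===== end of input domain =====

-- B replaces A's nested window scan by a single streak-counting pass (objective: simpler).

-- ===== PORT A =====
-- inner loop 'for j in range(5): if board_line[i+j] == player_selection: win += 1'
-- (indices i+j are always in range for i in range(count-4), so getD's default is never used)
def cvlWin (player_selection : Int) (board_line : List Int) (i : Nat) : Nat :=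
  (List.range 5).foldl
    (fun win j => if board_line.getD (i + j) 0 = player_selection then win + 1 else win) 0

-- outer loop 'for i in range(count - 4): … if win == 5: return True' with early return
def cvlLoop (player_selection : Int) (board_line : List Int) : List Nat → Bool
  | [] => false
  | i :: rest =>
      if cvlWin player_selection board_line i = 5 then true
      else cvlLoop player_selection board_line rest

def check_vertical_line (player_selection : Int) (board_line : List Int) : Bool :=
  cvlLoop player_selection board_line (List.range (board_line.length - 4))

-- ===== PORT B =====
-- single pass: streak = streak + 1 if cell == player_selection else 0; return True when streak hits 5
def cvlAlt (player_selection : Int) (streak : Int) : List Int → Bool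
  | [] => false
  | cell :: rest =>
      let s := if cell = player_selection then streak + 1 else 0
      if s = 5 then true else cvlAlt player_selection s rest

def check_vertical_line_alt (player_selection : Int) (board_line : List Int) : Bool :=
  cvlAlt player_selection 0 board_line

-- ===== PRECONDITION & SPEC =====
def Spec_check_vertical_line (player_selection : Int) (board_line : List Int) (out : Bool) : Prop := out = check_vertical_line_alt player_selection board_line
instance (player_selection : Int) (board_line : List Int) (out : Bool) : Decidable (Spec_check_vertical_line player_selection board_line out) := by unfold Spec_check_vertical_line; infer_instance

-- ===== CLAIM (what is proved, stated in full; the proofs are below) =====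
def Claim_equal_check_vertical_line : Prop := ∀ (player_selection : Int) (board_line : List Int), Dom_check_vertical_line player_selection board_line → Spec_check_vertical_line player_selection board_line (check_vertical_line player_selection board_line)

-- ===== LEMMAS AND PROOFS =====

-- middle spec: 'some suffix starts with n cells equal to p' machinery
def prefixRun (p : Int) (n : Nat) (l : List Int) : Bool :=
  decide (n ≤ l.length) && (l.take n).all (· = p)

def exists5 (p : Int) : List Int → Bool
  | [] => false
  | x :: xs => prefixRun p 5 (x :: xs) || exists5 p xs

theorem prefixRun_zero (p : Int) (l : List Int) : prefixRun p 0 l = true := by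
  simp [prefixRun]

theorem prefixRun_cons (p : Int) (n : Nat) (x : Int) (xs : List Int) :
    prefixRun p (n + 1) (x :: xs) = (decide (x = p) && prefixRun p n xs) := by
  simp [prefixRun, List.all_cons]
  by_cases hx : x = p <;> by_cases hn : n ≤ xs.length <;> simp [hx, hn]

theorem prefixRun_mono (p : Int) {m n : Nat} (h : m ≤ n) (l : List Int)
    (hn : prefixRun p n l = true) : prefixRun p m l = true := by
  simp [prefixRun] at hn ⊢
  obtain ⟨h1, h2⟩ := hn
  refine ⟨le_trans h h1, fun a ha => h2 a ?_⟩
  have : l.take m = (l.take n).take m := by rw [List.take_take, Nat.min_eq_left h]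
  rw [this] at ha
  exact List.take_subset _ _ ha

theorem prefixRun_absorb (p : Int) {m n : Nat} (h : m ≤ n) (l : List Int) :
    (prefixRun p m l || prefixRun p n l) = prefixRun p m l := by
  cases hn : prefixRun p n l
  · simp
  · simp [prefixRun_mono p h l hn]

theorem exists5_absorb (p : Int) (l : List Int) :
    (prefixRun p 5 l || exists5 p l) = exists5 p l := by
  cases l with
  | nil => simp [prefixRun, exists5]
  | cons x xs => simp [exists5]

-- B-side: streak invariant
theorem prefixRun5 (p a b c d e : Int) (rest : List Int) :
    prefixRun p 5 (a :: b :: c :: d :: e :: rest) =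
      (decide (a = p) && (decide (b = p) && (decide (c = p) && (decide (d = p) && decide (e = p))))) := by
  rw [show (5 : Nat) = 4 + 1 from rfl, prefixRun_cons, show (4 : Nat) = 3 + 1 from rfl,
    prefixRun_cons, show (3 : Nat) = 2 + 1 from rfl, prefixRun_cons,
    show (2 : Nat) = 1 + 1 from rfl, prefixRun_cons, show (1 : Nat) = 0 + 1 from rfl,
    prefixRun_cons, prefixRun_zero, Bool.and_true]

theorem cvlAlt_eq (p : Int) (l : List Int) : ∀ k : Int, 0 ≤ k → k ≤ 4 →
    cvlAlt p k l = (prefixRun p (5 - k).toNat l || exists5 p l) := by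
  induction l with
  | nil =>
    intro k h0 h4
    have h1 : 1 ≤ (5 - k).toNat := by omega
    simp [cvlAlt, exists5, prefixRun]
    omega
  | cons x xs ih =>
    intro k h0 h4
    have hm : (5 - k).toNat = (4 - k).toNat + 1 := by omega
    by_cases hx : x = p
    · by_cases h5 : k = 4
      · subst h5
        have : cvlAlt p 4 (x :: xs) = true := by simp [cvlAlt, hx]
        rw [this, hm, prefixRun_cons]
        simp [hx, prefixRun_zero]
      · have hk5 : k + 1 ≠ 5 := by omega
        have step : cvlAlt p k (x :: xs) = cvlAlt p (k + 1) xs := by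
          simp [cvlAlt, hx, hk5]
        have h41 : ((5 : Int) - (k + 1)).toNat = ((4 : Int) - k).toNat := by omega
        have habs : (prefixRun p ((4 : Int) - k).toNat xs || prefixRun p 4 xs) =
            prefixRun p ((4 : Int) - k).toNat xs := prefixRun_absorb p (by omega) xs
        rw [step, ih (k + 1) (by omega) (by omega), h41, hm, prefixRun_cons,
          show exists5 p (x :: xs) = (prefixRun p 5 (x :: xs) || exists5 p xs) from rfl,
          show (5 : Nat) = 4 + 1 from rfl, prefixRun_cons]
        simp only [hx, decide_true, Bool.true_and, ← Bool.or_assoc, habs]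
    · have step : cvlAlt p k (x :: xs) = cvlAlt p 0 xs := by
        simp [cvlAlt, hx]
      rw [step, ih 0 le_rfl (by norm_num),
        show ((5 : Int) - 0).toNat = 5 from rfl, exists5_absorb, hm, prefixRun_cons,
        show exists5 p (x :: xs) = (prefixRun p 5 (x :: xs) || exists5 p xs) from rfl,
        show (5 : Nat) = 4 + 1 from rfl, prefixRun_cons]
      simp [hx]

-- A-side: window shift lemmas
theorem cvlWin_shift (p : Int) (x : Int) (xs : List Int) (i : Nat) :
    cvlWin p (x :: xs) (i + 1) = cvlWin p xs i := by
  simp [cvlWin, show List.range 5 = [0,1,2,3,4] from rfl, List.foldl]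

theorem cvlLoop_shift (p : Int) (x : Int) (xs : List Int) (ixs : List Nat) :
    cvlLoop p (x :: xs) (ixs.map Nat.succ) = cvlLoop p xs ixs := by
  induction ixs with
  | nil => rfl
  | cons i rest ih =>
    simp only [List.map_cons, cvlLoop]
    rw [show Nat.succ i = i + 1 from rfl, cvlWin_shift, ih]

theorem cvlWin_zero (p a b c d e : Int) (rest : List Int) :
    (cvlWin p (a :: b :: c :: d :: e :: rest) 0 = 5) ↔
      (a = p ∧ b = p ∧ c = p ∧ d = p ∧ e = p) := by
  simp only [cvlWin, show List.range 5 = [0,1,2,3,4] from rfl, List.foldl, List.getD,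
    List.getElem?_cons_zero, List.getElem?_cons_succ, Option.getD_some]
  split_ifs <;> simp_all

theorem check_eq_exists5 (p : Int) (l : List Int) :
    check_vertical_line p l = exists5 p l := by
  induction l with
  | nil => rfl
  | cons a xs ih =>
    match xs, ih with
    | [], _ => rfl
    | [b], _ => rfl
    | [b, c], _ => rfl
    | [b, c, d], _ => rfl
    | b :: c :: d :: e :: rest, ih =>
      have hlen : (a :: b :: c :: d :: e :: rest).length - 4 = rest.length + 1 := by
        simp
      rw [check_vertical_line, hlen, List.range_succ_eq_map]
      rw [show cvlLoop p (a :: b :: c :: d :: e :: rest)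
            (0 :: (List.range rest.length).map Nat.succ) =
          if cvlWin p (a :: b :: c :: d :: e :: rest) 0 = 5 then true
          else cvlLoop p (a :: b :: c :: d :: e :: rest)
            ((List.range rest.length).map Nat.succ) from rfl]
      rw [cvlLoop_shift]
      have hxs : cvlLoop p (b :: c :: d :: e :: rest) (List.range rest.length) =
          check_vertical_line p (b :: c :: d :: e :: rest) := by
        rw [check_vertical_line, show (b :: c :: d :: e :: rest).length - 4 = rest.length from by simp]
      rw [hxs, ih,
        show exists5 p (a :: b :: c :: d :: e :: rest) =
          (prefixRun p 5 (a :: b :: c :: d :: e :: rest) ||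
            exists5 p (b :: c :: d :: e :: rest)) from rfl,
        prefixRun5]
      by_cases hw : cvlWin p (a :: b :: c :: d :: e :: rest) 0 = 5
      · obtain ⟨h1, h2, h3, h4, h5⟩ := (cvlWin_zero p a b c d e rest).mp hw
        rw [if_pos hw]
        simp [h1, h2, h3, h4, h5]
      · have hconj := (cvlWin_zero p a b c d e rest).not.mp hw
        have : (decide (a = p) && (decide (b = p) && (decide (c = p) &&
            (decide (d = p) && decide (e = p))))) = false := by
          by_cases h1 : a = p <;> by_cases h2 : b = p <;> by_cases h3 : c = p <;>
            by_cases h4 : d = p <;> by_cases h5 : e = p <;> simp_all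
        simp [if_neg hw, this]

theorem alt_eq_exists5 (p : Int) (l : List Int) :
    check_vertical_line_alt p l = exists5 p l := by
  rw [check_vertical_line_alt, cvlAlt_eq p l 0 le_rfl (by norm_num),
    show ((5 : Int) - 0).toNat = 5 from rfl, exists5_absorb]

-- ===== VERDICT (by name: the statement is the Claim_ definition above) =====
theorem check_vertical_line_spec : Claim_equal_check_vertical_line := by
  intro p l _
  unfold Spec_check_vertical_line
  rw [check_eq_exists5, alt_eq_exists5]
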